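-- pv_equiv track=rewrite | github.com/zhouchanghai/problem_ans | codility/2018Gallium.py | solution
-- ===== SOURCE A (Python) =====
-- from collections import Counter
--
-- def solution(A):
--     counter = Counter()
--     for n in A:
--         p2, p5 = 0, 0
--         while n%2 == 0:
--             p2 += 1
--             n //= 2
--         while n%5 == 0:
--             p5 += 1
--             n //= 5
--         counter[(p2,p5)] += 1
--     result = 0
--     factors = [(k[0], k[1], counter[k]) for k in counter]
--     n = len(factors)
--     for i in range(n):
--         a2, a5, _ = factors[i]
--         for j in range(i+1, n):
--             b2, b5, _ = factors[j]
--             for k in range(j+1, n):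
--                 c2, c5, _ = factors[k]
--                 result = max(result, min(a2+b2+c2, a5+b5+c5))
--
--     for i in range(n):
--         a2, a5, acount = factors[i]
--         if acount >= 3:
--             result = max(result, 3 * min(a2,a5))
--         if acount < 2: continue
--         for j in range(n):
--             if j == i: continue
--             b2, b5, _ = factors[j]
--             result = max(result, min(a2+a2+b2, a5+a5+b5))
--     return result
-- ===== SOURCE B (Python) =====
-- from itertools import combinations
--
-- def solution(A):
--     fac = []
--     for n in A:
--         p2 = 0
--         while n % 2 == 0:
--             p2 += 1
--             n //= 2
--         p5 = 0
--         while n % 5 == 0: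
--             p5 += 1
--             n //= 5
--         fac.append((p2, p5))
--     result = 0
--     for (a2, a5), (b2, b5), (c2, c5) in combinations(fac, 3):
--         result = max(result, min(a2 + b2 + c2, a5 + b5 + c5))
--     return result
-- ===== Notes on version B (the rewrite author's own statement) =====
-- stated objective: simpler
-- what changed: Drops A's Counter grouping, its distinct-key index-table triple loop and the two special-case count>=2/count>=3 loops, replacing them with one pass collecting each element's (p2,p5) pair and a single scan over itertools.combinations of element triples.
import Mathlib
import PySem

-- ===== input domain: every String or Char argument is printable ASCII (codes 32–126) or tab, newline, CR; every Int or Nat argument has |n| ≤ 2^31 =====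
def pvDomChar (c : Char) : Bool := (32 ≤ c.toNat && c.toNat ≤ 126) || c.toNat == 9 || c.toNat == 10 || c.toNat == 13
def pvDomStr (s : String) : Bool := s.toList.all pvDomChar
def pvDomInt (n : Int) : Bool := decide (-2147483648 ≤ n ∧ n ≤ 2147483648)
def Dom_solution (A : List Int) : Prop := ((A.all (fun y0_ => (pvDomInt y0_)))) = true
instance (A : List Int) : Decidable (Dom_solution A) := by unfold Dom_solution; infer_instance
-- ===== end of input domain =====

-- B replaces A's Counter/index-table grouping by a single scan over all element triples
-- (itertools.combinations); not faster, just simpler. (On a list containing 0 both Pythons loop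
-- forever; the ports' totality guard makes both return the same value there too.)

-- ===== PORT A =====
-- the two while-loops 'while n%p==0: c+=1; n//=p' (p = 2 or 5); the guard 2 ≤ p ∧ n ≠ 0 only
-- makes the recursion total (Python diverges at n = 0; nothing is claimed about behaviour there)
def pvStrip (p n : Int) : Int × Int :=
  if h : 2 ≤ p ∧ n ≠ 0 ∧ PySem.Int.mod n p = 0 then
    let r := pvStrip p (PySem.Int.floordiv n p)
    (r.1 + 1, r.2)
  else (0, n)
termination_by n.natAbs
decreasing_by
  obtain ⟨hp, hn, hm⟩ := h
  rw [PySem.Int.floordiv_eq_ediv_of_pos (by omega)]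
  have hd : p ∣ n := (PySem.Int.mod_eq_zero_iff_dvd n p).mp hm
  have hq : n / p * p = n := Int.ediv_mul_cancel hd
  have h1 : (n / p).natAbs * p.natAbs = n.natAbs := by
    rw [← Int.natAbs_mul, hq]
  have h2 : (n / p).natAbs ≠ 0 := by
    intro h0; rw [h0] at h1; simp at h1; omega
  have hp2 : 2 ≤ p.natAbs := by omega
  have h3 : (n / p).natAbs < (n / p).natAbs * p.natAbs :=
    Nat.lt_mul_iff_one_lt_right (Nat.pos_of_ne_zero h2) |>.mpr (by omega)
  omega

-- per-element factor pair: p2 from stripping 2s, then p5 from stripping 5s of the remainder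
def pvFactors (n : Int) : Int × Int :=
  let r2 := pvStrip 2 n
  let r5 := pvStrip 5 r2.2
  (r2.1, r5.1)

def solution (A : List Int) : Int :=
  let counter : PySem.Dict (Int × Int) Int :=
    A.foldl (fun d n => d.modify (pvFactors n) 0 (· + 1)) PySem.Dict.empty
  let factors : List (Int × Int × Int) :=
    counter.keys.map (fun k => (k.1, k.2, counter.getD k 0))
  let n : Int := factors.length
  let r1 : Int := (PySem.List.pyRange 0 n 1).foldl (fun result i =>
      let a := PySem.List.pyGetD factors i (0, 0, 0)
      (PySem.List.pyRange (i + 1) n 1).foldl (fun result j =>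
        let b := PySem.List.pyGetD factors j (0, 0, 0)
        (PySem.List.pyRange (j + 1) n 1).foldl (fun result k =>
          let c := PySem.List.pyGetD factors k (0, 0, 0)
          max result (min (a.1 + b.1 + c.1) (a.2.1 + b.2.1 + c.2.1))) result) result) 0
  (PySem.List.pyRange 0 n 1).foldl (fun result i =>
      let a := PySem.List.pyGetD factors i (0, 0, 0)
      let result := if 3 ≤ a.2.2 then max result (3 * min a.1 a.2.1) else result
      if a.2.2 < 2 then result else
      (PySem.List.pyRange 0 n 1).foldl (fun result j =>
        if j = i then result else
        let b := PySem.List.pyGetD factors j (0, 0, 0)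
        max result (min (a.1 + a.1 + b.1) (a.2.1 + a.2.1 + b.2.1))) result) r1

-- ===== PORT B =====
-- itertools.combinations(l, 3), in itertools order
def pvPairs {α : Type} : List α → List (α × α)
  | [] => []
  | x :: xs => (xs.map (fun y => (x, y))) ++ pvPairs xs

def pvComb3 {α : Type} : List α → List (α × α × α)
  | [] => []
  | x :: xs => ((pvPairs xs).map (fun yz => (x, yz.1, yz.2))) ++ pvComb3 xs

def solution_alt (A : List Int) : Int :=
  let fac := A.map pvFactors
  (pvComb3 fac).foldl (fun result t =>
    max result (min (t.1.1 + t.2.1.1 + t.2.2.1) (t.1.2 + t.2.1.2 + t.2.2.2))) 0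

-- ===== PRECONDITION & SPEC =====
def Spec_solution (A : List Int) (out : Int) : Prop := out = solution_alt A
instance (A : List Int) (out : Int) : Decidable (Spec_solution A out) := by unfold Spec_solution; infer_instance

-- ===== CLAIM (what is proved, stated in full; the proofs are below) =====
def Claim_equal_solution : Prop := ∀ (A : List Int), Dom_solution A → Spec_solution A (solution A)

-- ===== LEMMAS AND PROOFS =====

-- the value of a triple of factor pairs
def pvVal (x y z : Int × Int) : Int := min (x.1 + y.1 + z.1) (x.2 + y.2 + z.2)

-- generic fold lemmas for running-max style loops
theorem pvFoldlGe {α : Type} (f : Int → α → Int) (h : ∀ r x, r ≤ f r x) :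
    ∀ (l : List α) (r : Int), r ≤ List.foldl f r l := by
  intro l
  induction l with
  | nil => intro r; simp
  | cons x xs ih => intro r; exact le_trans (h r x) (ih (f r x))

theorem pvFoldlLe {α : Type} (f : Int → α → Int) (m : Int) :
    ∀ (l : List α) (r : Int), r ≤ m → (∀ r' x, x ∈ l → r' ≤ m → f r' x ≤ m) →
      List.foldl f r l ≤ m := by
  intro l
  induction l with
  | nil => intro r hr _; simpa using hr
  | cons x xs ih =>
      intro r hr hstep
      exact ih (f r x) (hstep r x (List.mem_cons_self) hr)
        (fun r' y hy => hstep r' y (List.mem_cons_of_mem x hy))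

theorem pvFoldlContrib {α : Type} (f : Int → α → Int) (h : ∀ r x, r ≤ f r x)
    (v : Int) (x : α) (hv : ∀ r, v ≤ f r x) :
    ∀ (l : List α) (r : Int), x ∈ l → v ≤ List.foldl f r l := by
  intro l
  induction l with
  | nil => intro r hx; simp at hx
  | cons y ys ih =>
      intro r hx
      rcases List.mem_cons.mp hx with h1 | h1
      · subst h1; exact le_trans (hv r) (pvFoldlGe f h ys (f r x))
      · exact ih (f r y) h1

theorem mem_pvPairs {α : Type} (y z : α) :
    ∀ (l : List α), (y, z) ∈ pvPairs l ↔ List.Sublist [y, z] l := by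
  intro l
  induction l with
  | nil => simp [pvPairs]
  | cons a l ih =>
      rw [List.sublist_cons_iff]
      simp only [pvPairs, List.mem_append, List.mem_map, ih]
      constructor
      · rintro (⟨w, hw, he⟩ | h)
        · have h1 : a = y := congrArg Prod.fst he
          have h2 : w = z := congrArg Prod.snd he
          subst h1; subst h2
          exact Or.inr ⟨_, rfl, List.singleton_sublist.mpr hw⟩
        · exact Or.inl h
      · rintro (h | ⟨t, ht, hs⟩)
        · exact Or.inr h
        · cases ht
          have hz : z ∈ l := List.singleton_sublist.mp hs
          exact Or.inl ⟨z, hz, rfl⟩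

theorem mem_pvComb3 {α : Type} (x y z : α) :
    ∀ (l : List α), (x, y, z) ∈ pvComb3 l ↔ List.Sublist [x, y, z] l := by
  intro l
  induction l with
  | nil => simp [pvComb3]
  | cons a l ih =>
      rw [List.sublist_cons_iff]
      simp only [pvComb3, List.mem_append, List.mem_map, ih]
      constructor
      · rintro (⟨w, hw, he⟩ | h)
        · have h1 : a = x := congrArg Prod.fst he
          have h2 : w.1 = y := congrArg (fun p => p.2.1) he
          have h3 : w.2 = z := congrArg (fun p => p.2.2) he
          subst h1; subst h2; subst h3
          exact Or.inr ⟨_, rfl, (mem_pvPairs w.1 w.2 l).mp (by simpa using hw)⟩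
        · exact Or.inl h
      · rintro (h | ⟨t, ht, hs⟩)
        · exact Or.inr h
        · cases ht
          exact Or.inl ⟨(y, z), (mem_pvPairs y z l).mpr hs, rfl⟩

-- ===== B-side characterization =====
theorem pvB_nonneg (A : List Int) : 0 ≤ solution_alt A := by
  apply pvFoldlGe
  intro r t
  exact le_max_left _ _

theorem pvB_contrib (A : List Int) (x y z : Int × Int)
    (h : List.Sublist [x, y, z] (A.map pvFactors)) : pvVal x y z ≤ solution_alt A := by
  unfold solution_alt
  refine pvFoldlContrib _ ?_ _ (x, y, z) ?_ _ _ ?_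
  · intro r t; exact le_max_left _ _
  · intro r; exact le_max_right _ _
  · exact (mem_pvComb3 x y z _).mpr h

theorem pvB_le (A : List Int) (m : Int) (h0 : 0 ≤ m)
    (h : ∀ x y z : Int × Int, List.Sublist [x, y, z] (A.map pvFactors) → pvVal x y z ≤ m) :
    solution_alt A ≤ m := by
  unfold solution_alt
  apply pvFoldlLe _ _ _ _ h0
  intro r t ht hr
  obtain ⟨x, y, z⟩ := t
  refine max_le hr (h x y z ?_)
  exact (mem_pvComb3 x y z _).mp ht

-- the two lawful BEq instances on pairs count identically
theorem pvCount_eq (e : Int × Int) (l : List (Int × Int)) :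
    @List.count (Int × Int) instBEqOfDecidableEq e l = @List.count (Int × Int) instBEqProd e l := by
  induction l with
  | nil => rfl
  | cons x xs ih => simp [List.count_cons, ih, beq_iff_eq]

-- subperm packaging: any multiset of three factor pairs contained (with multiplicity) in
-- A.map pvFactors contributes to solution_alt
theorem pvB_contrib_count (A : List Int) (a b c : Int × Int)
    (h : ∀ e : Int × Int, List.count e [a, b, c] ≤ List.count e (A.map pvFactors)) :
    pvVal a b c ≤ solution_alt A := by
  have hsp : List.Subperm [a, b, c] (A.map pvFactors) := by
    rw [List.subperm_iff_count]
    intro e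
    have h1 := h e
    simpa [pvCount_eq] using h1
  obtain ⟨l, hperm, hsub⟩ := hsp
  obtain ⟨x, y, z, rfl⟩ := List.length_eq_three.mp (hperm.length_eq.trans (by simp))
  have h1 := List.Perm.sum_eq (hperm.map Prod.fst)
  have h2 := List.Perm.sum_eq (hperm.map Prod.snd)
  simp at h1 h2
  have hb := pvB_contrib A x y z hsub
  unfold pvVal at hb ⊢
  omega

-- ===== A-side characterization =====
-- proof-side names for A's 'factors' table and its two loops
def pvKs (A : List Int) : List (Int × Int) := PySem.List.dedup (A.map pvFactors)
def pvFactorsTbl (A : List Int) : List (Int × Int × Int) :=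
  (pvKs A).map (fun k => (k.1, k.2, ((A.map pvFactors).count k : Int)))

def pvLoop1 (factors : List (Int × Int × Int)) (n r0 : Int) : Int :=
  (PySem.List.pyRange 0 n 1).foldl (fun result i =>
      let a := PySem.List.pyGetD factors i (0, 0, 0)
      (PySem.List.pyRange (i + 1) n 1).foldl (fun result j =>
        let b := PySem.List.pyGetD factors j (0, 0, 0)
        (PySem.List.pyRange (j + 1) n 1).foldl (fun result k =>
          let c := PySem.List.pyGetD factors k (0, 0, 0)
          max result (min (a.1 + b.1 + c.1) (a.2.1 + b.2.1 + c.2.1))) result) result) r0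

def pvLoop2 (factors : List (Int × Int × Int)) (n r0 : Int) : Int :=
  (PySem.List.pyRange 0 n 1).foldl (fun result i =>
      let a := PySem.List.pyGetD factors i (0, 0, 0)
      let result := if 3 ≤ a.2.2 then max result (3 * min a.1 a.2.1) else result
      if a.2.2 < 2 then result else
      (PySem.List.pyRange 0 n 1).foldl (fun result j =>
        if j = i then result else
        let b := PySem.List.pyGetD factors j (0, 0, 0)
        max result (min (a.1 + a.1 + b.1) (a.2.1 + a.2.1 + b.2.1))) result) r0

theorem pvA_unfold (A : List Int) :
    solution A = pvLoop2 (pvFactorsTbl A) ((pvFactorsTbl A).length : Int)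
      (pvLoop1 (pvFactorsTbl A) ((pvFactorsTbl A).length : Int) 0) := by
  have hc : A.foldl (fun d n => d.modify (pvFactors n) 0 (· + 1)) PySem.Dict.empty
      = PySem.Dict.counter (A.map pvFactors) := by
    rw [PySem.Dict.counter_eq_foldl, List.foldl_map]
  have hf : (PySem.Dict.counter (A.map pvFactors)).keys.map
        (fun k => (k.1, k.2, (PySem.Dict.counter (A.map pvFactors)).getD k 0))
      = pvFactorsTbl A := by
    unfold pvFactorsTbl pvKs
    simp [PySem.Dict.keys_counter, PySem.Dict.getD_counter]
  simp only [solution, hc, hf, pvLoop1, pvLoop2]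

theorem pvLoop1_ge (factors : List (Int × Int × Int)) (n : Int) :
    ∀ r0, r0 ≤ pvLoop1 factors n r0 := by
  intro r0
  apply pvFoldlGe _ (fun r i => ?_)
  apply pvFoldlGe _ (fun r j => ?_)
  apply pvFoldlGe _ (fun r k => ?_)
  exact le_max_left _ _

theorem pvLoop2_ge (factors : List (Int × Int × Int)) (n : Int) :
    ∀ r0, r0 ≤ pvLoop2 factors n r0 := by
  intro r0
  apply pvFoldlGe
  intro r i
  try dsimp only
  have hstep : r ≤ if 3 ≤ (PySem.List.pyGetD factors i (0, 0, 0)).2.2 then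
      max r (3 * min (PySem.List.pyGetD factors i (0, 0, 0)).1
        (PySem.List.pyGetD factors i (0, 0, 0)).2.1) else r := by
    split
    · exact le_max_left _ _
    · exact le_refl _
  refine le_trans hstep ?_
  repeat' split
  all_goals
    first
      | exact le_refl _
      | exact le_max_left _ _
      | (apply pvFoldlGe
         intro r' j
         try dsimp only
         split
         · exact le_refl _
         · exact le_max_left _ _)

theorem pvA_nonneg (A : List Int) : 0 ≤ solution A := by
  rw [pvA_unfold]
  exact le_trans (pvLoop1_ge _ _ 0) (pvLoop2_ge _ _ _)

theorem pvTbl_get (A : List Int) (i : Nat) (h : i < (pvKs A).length) :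
    PySem.List.pyGetD (pvFactorsTbl A) (i : Int) (0, 0, 0) =
      ((pvKs A)[i].1, (pvKs A)[i].2, ((A.map pvFactors).count (pvKs A)[i] : Int)) := by
  rw [PySem.List.pyGetD_natCast]
  rw [List.getD_eq_getElem _ _ (by simpa [pvFactorsTbl] using h)]
  simp [pvFactorsTbl]

theorem pvA_contrib1 (A : List Int) (i j k : Nat) (hij : i < j) (hjk : j < k)
    (hk : k < (pvKs A).length) :
    pvVal (pvKs A)[i] (pvKs A)[j] (pvKs A)[k] ≤ solution A := by
  rw [pvA_unfold]
  refine le_trans ?_ (pvLoop2_ge _ _ _)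
  unfold pvLoop1
  have hlen : ((pvFactorsTbl A).length : Int) = ((pvKs A).length : Int) := by
    simp [pvFactorsTbl]
  refine pvFoldlContrib _ ?_ _ ((i : Nat) : Int) ?_ _ _ ?_
  · intro r x
    try dsimp only
    apply pvFoldlGe
    intro r' j'
    try dsimp only
    apply pvFoldlGe
    intro r'' k'
    exact le_max_left _ _
  · intro r
    try dsimp only
    refine pvFoldlContrib _ ?_ _ ((j : Nat) : Int) ?_ _ _ ?_
    · intro r' x
      try dsimp only
      apply pvFoldlGe
      intro r'' k'
      exact le_max_left _ _
    · intro r'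
      try dsimp only
      refine pvFoldlContrib _ ?_ _ ((k : Nat) : Int) ?_ _ _ ?_
      · intro r'' x
        exact le_max_left _ _
      · intro r''
        rw [pvTbl_get A i (by omega), pvTbl_get A j (by omega), pvTbl_get A k hk]
        exact le_max_right _ _
      · rw [PySem.List.mem_pyRange_one, hlen]
        constructor
        · exact_mod_cast by omega
        · exact_mod_cast hk
    · rw [PySem.List.mem_pyRange_one, hlen]
      constructor
      · exact_mod_cast by omega
      · exact_mod_cast by omega
  · rw [PySem.List.mem_pyRange_one, hlen]
    constructor
    · exact_mod_cast by omega
    · exact_mod_cast by omega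

-- step of pvLoop2's outer fold only ever increases the accumulator
theorem pvLoop2Body_ge (factors : List (Int × Int × Int)) (n : Int) :
    ∀ (r x : Int), r ≤ (fun result i =>
      let a := PySem.List.pyGetD factors i (0, 0, 0)
      let result := if 3 ≤ a.2.2 then max result (3 * min a.1 a.2.1) else result
      if a.2.2 < 2 then result else
      (PySem.List.pyRange 0 n 1).foldl (fun result j =>
        if j = i then result else
        let b := PySem.List.pyGetD factors j (0, 0, 0)
        max result (min (a.1 + a.1 + b.1) (a.2.1 + a.2.1 + b.2.1))) result) r x := by
  intro r i
  try dsimp only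
  have hstep : r ≤ if 3 ≤ (PySem.List.pyGetD factors i (0, 0, 0)).2.2 then
      max r (3 * min (PySem.List.pyGetD factors i (0, 0, 0)).1
        (PySem.List.pyGetD factors i (0, 0, 0)).2.1) else r := by
    split
    · exact le_max_left _ _
    · exact le_refl _
  refine le_trans hstep ?_
  repeat' split
  all_goals
    first
      | exact le_refl _
      | exact le_max_left _ _
      | (apply pvFoldlGe
         intro r' j
         try dsimp only
         split
         · exact le_refl _
         · exact le_max_left _ _)

theorem pvA_contrib2 (A : List Int) (a : Int × Int) (ha : a ∈ pvKs A)
    (hc : 3 ≤ (A.map pvFactors).count a) : 3 * min a.1 a.2 ≤ solution A := by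
  rw [pvA_unfold]
  have hlen : ((pvFactorsTbl A).length : Int) = ((pvKs A).length : Int) := by
    simp [pvFactorsTbl]
  have hi : (pvKs A).idxOf a < (pvKs A).length := List.idxOf_lt_length_of_mem ha
  have hget : (pvKs A)[(pvKs A).idxOf a] = a := List.getElem_idxOf hi
  unfold pvLoop2
  refine pvFoldlContrib _ (pvLoop2Body_ge _ _) _ (((pvKs A).idxOf a : Nat) : Int) ?_ _ _ ?_
  · intro r
    try dsimp only
    rw [pvTbl_get A _ hi, hget]
    try dsimp only
    have h3 : (3 : Int) ≤ ((A.map pvFactors).count a : Int) := by exact_mod_cast hc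
    rw [if_pos h3, if_neg (by omega)]
    refine le_trans (le_max_right r _) ?_
    apply pvFoldlGe
    intro r' j
    try dsimp only
    split
    · exact le_refl _
    · exact le_max_left _ _
  · rw [PySem.List.mem_pyRange_one, hlen]
    constructor
    · exact_mod_cast Nat.zero_le _
    · exact_mod_cast hi

theorem pvA_contrib3 (A : List Int) (a b : Int × Int) (ha : a ∈ pvKs A) (hb : b ∈ pvKs A)
    (hne : a ≠ b) (hc : 2 ≤ (A.map pvFactors).count a) :
    pvVal a a b ≤ solution A := by
  rw [pvA_unfold]
  have hlen : ((pvFactorsTbl A).length : Int) = ((pvKs A).length : Int) := by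
    simp [pvFactorsTbl]
  have hi : (pvKs A).idxOf a < (pvKs A).length := List.idxOf_lt_length_of_mem ha
  have hgeti : (pvKs A)[(pvKs A).idxOf a] = a := List.getElem_idxOf hi
  have hj : (pvKs A).idxOf b < (pvKs A).length := List.idxOf_lt_length_of_mem hb
  have hgetj : (pvKs A)[(pvKs A).idxOf b] = b := List.getElem_idxOf hj
  have hij : (pvKs A).idxOf a ≠ (pvKs A).idxOf b := by
    intro h
    simp only [h] at hgeti
    exact hne (hgeti.symm.trans hgetj)
  unfold pvLoop2
  refine pvFoldlContrib _ (pvLoop2Body_ge _ _) _ (((pvKs A).idxOf a : Nat) : Int) ?_ _ _ ?_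
  · intro r
    try dsimp only
    rw [pvTbl_get A _ hi, hgeti]
    try dsimp only
    have h2 : (2 : Int) ≤ ((A.map pvFactors).count a : Int) := by exact_mod_cast hc
    rw [if_neg (by omega)]
    have hstep : ∀ r' : Int, pvVal a a b ≤ if (((pvKs A).idxOf b : Nat) : Int)
          = (((pvKs A).idxOf a : Nat) : Int) then r' else
        max r' (min (a.1 + a.1 + b.1) (a.2 + a.2 + b.2)) := by
      intro r'
      rw [if_neg (by exact fun h => hij (by exact_mod_cast h.symm))]
      exact le_max_right _ _
    refine pvFoldlContrib _ ?_ _ (((pvKs A).idxOf b : Nat) : Int) ?_ _ _ ?_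
    · intro r' j
      try dsimp only
      split
      · exact le_refl _
      · exact le_max_left _ _
    · intro r'
      try dsimp only
      rw [pvTbl_get A _ hj, hgetj]
      try dsimp only
      exact hstep r'
    · rw [PySem.List.mem_pyRange_one, hlen]
      constructor
      · exact_mod_cast Nat.zero_le _
      · exact_mod_cast hj
  · rw [PySem.List.mem_pyRange_one, hlen]
    constructor
    · exact_mod_cast Nat.zero_le _
    · exact_mod_cast hi

theorem pvA_le (A : List Int) (m : Int) (h0 : 0 ≤ m)
    (h1 : ∀ (i j k : Nat) (hij : i < j) (hjk : j < k) (hk : k < (pvKs A).length),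
        pvVal (pvKs A)[i] (pvKs A)[j] (pvKs A)[k] ≤ m)
    (h2 : ∀ a ∈ pvKs A, 3 ≤ (A.map pvFactors).count a → 3 * min a.1 a.2 ≤ m)
    (h3 : ∀ a b : Int × Int, a ∈ pvKs A → b ∈ pvKs A → a ≠ b →
        2 ≤ (A.map pvFactors).count a → pvVal a a b ≤ m) :
    solution A ≤ m := by
  rw [pvA_unfold]
  have hlen : ((pvFactorsTbl A).length : Int) = ((pvKs A).length : Int) := by
    simp [pvFactorsTbl]
  have hL1 : pvLoop1 (pvFactorsTbl A) ((pvFactorsTbl A).length : Int) 0 ≤ m := by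
    unfold pvLoop1
    apply pvFoldlLe _ _ _ _ h0
    intro r i hiMem hr
    rw [PySem.List.mem_pyRange_one, hlen] at hiMem
    try dsimp only
    apply pvFoldlLe _ _ _ _ hr
    intro r' j hjMem hr'
    rw [PySem.List.mem_pyRange_one, hlen] at hjMem
    try dsimp only
    apply pvFoldlLe _ _ _ _ hr'
    intro r'' k hkMem hr''
    rw [PySem.List.mem_pyRange_one, hlen] at hkMem
    try dsimp only
    have hiN : i = ((i.toNat : Nat) : Int) := by omega
    have hjN : j = ((j.toNat : Nat) : Int) := by omega
    have hkN : k = ((k.toNat : Nat) : Int) := by omega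
    have hkL : k.toNat < (pvKs A).length := by omega
    rw [hiN, hjN, hkN, pvTbl_get A _ (by omega), pvTbl_get A _ (by omega), pvTbl_get A _ hkL]
    try dsimp only
    refine max_le hr'' ?_
    have := h1 i.toNat j.toNat k.toNat (by omega) (by omega) hkL
    unfold pvVal at this
    exact this
  unfold pvLoop2
  apply pvFoldlLe _ _ _ _ hL1
  intro r i hiMem hr
  rw [PySem.List.mem_pyRange_one, hlen] at hiMem
  try dsimp only
  have hiN : i = ((i.toNat : Nat) : Int) := by omega
  have hiL : i.toNat < (pvKs A).length := by omega
  rw [hiN, pvTbl_get A _ hiL]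
  try dsimp only
  have hmem_i : (pvKs A)[i.toNat] ∈ pvKs A := List.getElem_mem hiL
  have hr1 : (if (3 : Int) ≤ ((A.map pvFactors).count (pvKs A)[i.toNat] : Int) then
      max r (3 * min (pvKs A)[i.toNat].1 (pvKs A)[i.toNat].2) else r) ≤ m := by
    split
    · next h3c =>
        refine max_le hr ?_
        exact h2 _ hmem_i (by exact_mod_cast h3c)
    · exact hr
  split
  · exact hr1
  · next hcnt =>
      apply pvFoldlLe _ _ _ _ hr1
      intro r' j hjMem hr'
      rw [PySem.List.mem_pyRange_one, hlen] at hjMem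
      try dsimp only
      split
      · exact hr'
      · next hji =>
          have hjN : j = ((j.toNat : Nat) : Int) := by omega
          have hjL : j.toNat < (pvKs A).length := by omega
          rw [hjN, pvTbl_get A _ hjL]
          try dsimp only
          refine max_le hr' ?_
          rw [hjN] at hji
          have hne : (pvKs A)[i.toNat] ≠ (pvKs A)[j.toNat] := by
            intro he
            have : i.toNat = j.toNat :=
              (List.Nodup.getElem_inj_iff (PySem.List.nodup_dedup (A.map pvFactors))).mp he
            omega
          have := h3 (pvKs A)[i.toNat] (pvKs A)[j.toNat] hmem_i (List.getElem_mem hjL)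
            hne (by omega)
          unfold pvVal at this
          exact this

-- a, b, c pairwise distinct members of pvKs contribute in any order (pvVal is symmetric)
theorem pvA_contrib1' (A : List Int) (a b c : Int × Int) (ha : a ∈ pvKs A) (hb : b ∈ pvKs A)
    (hc : c ∈ pvKs A) (hab : a ≠ b) (hbc : b ≠ c) (hac : a ≠ c) :
    pvVal a b c ≤ solution A := by
  have hia : (pvKs A).idxOf a < (pvKs A).length := List.idxOf_lt_length_of_mem ha
  have hib : (pvKs A).idxOf b < (pvKs A).length := List.idxOf_lt_length_of_mem hb
  have hic : (pvKs A).idxOf c < (pvKs A).length := List.idxOf_lt_length_of_mem hc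
  have hga : (pvKs A)[(pvKs A).idxOf a] = a := List.getElem_idxOf hia
  have hgb : (pvKs A)[(pvKs A).idxOf b] = b := List.getElem_idxOf hib
  have hgc : (pvKs A)[(pvKs A).idxOf c] = c := List.getElem_idxOf hic
  have hab' : (pvKs A).idxOf a ≠ (pvKs A).idxOf b := by
    intro h; simp only [h] at hga; exact hab (hga.symm.trans hgb)
  have hbc' : (pvKs A).idxOf b ≠ (pvKs A).idxOf c := by
    intro h; simp only [h] at hgb; exact hbc (hgb.symm.trans hgc)
  have hac' : (pvKs A).idxOf a ≠ (pvKs A).idxOf c := by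
    intro h; simp only [h] at hga; exact hac (hga.symm.trans hgc)
  have key : ∀ (i j k : Nat) (hij : i < j) (hjk : j < k) (hk : k < (pvKs A).length),
      ((pvKs A)[i]'(by omega) = a ∧ (pvKs A)[j]'(by omega) = b ∧ (pvKs A)[k]'(by omega) = c) ∨
      ((pvKs A)[i]'(by omega) = a ∧ (pvKs A)[j]'(by omega) = c ∧ (pvKs A)[k]'(by omega) = b) ∨
      ((pvKs A)[i]'(by omega) = b ∧ (pvKs A)[j]'(by omega) = a ∧ (pvKs A)[k]'(by omega) = c) ∨
      ((pvKs A)[i]'(by omega) = b ∧ (pvKs A)[j]'(by omega) = c ∧ (pvKs A)[k]'(by omega) = a) ∨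
      ((pvKs A)[i]'(by omega) = c ∧ (pvKs A)[j]'(by omega) = a ∧ (pvKs A)[k]'(by omega) = b) ∨
      ((pvKs A)[i]'(by omega) = c ∧ (pvKs A)[j]'(by omega) = b ∧ (pvKs A)[k]'(by omega) = a) →
      pvVal a b c ≤ solution A := by
    intro i j k hij hjk hk hcase
    have h1 := pvA_contrib1 A i j k hij hjk hk
    rcases hcase with ⟨e1, e2, e3⟩ | ⟨e1, e2, e3⟩ | ⟨e1, e2, e3⟩ | ⟨e1, e2, e3⟩ |
      ⟨e1, e2, e3⟩ | ⟨e1, e2, e3⟩ <;>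
      rw [e1, e2, e3] at h1 <;> (unfold pvVal at h1 ⊢; omega)
  rcases lt_trichotomy ((pvKs A).idxOf a) ((pvKs A).idxOf b) with h1 | h1 | h1
  · rcases lt_trichotomy ((pvKs A).idxOf b) ((pvKs A).idxOf c) with h2 | h2 | h2
    · exact key _ _ _ h1 h2 hic (Or.inl ⟨hga, hgb, hgc⟩)
    · exact absurd h2 hbc'
    · rcases lt_trichotomy ((pvKs A).idxOf a) ((pvKs A).idxOf c) with h3 | h3 | h3
      · exact key _ _ _ h3 h2 hib (Or.inr (Or.inl ⟨hga, hgc, hgb⟩))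
      · exact absurd h3 hac'
      · exact key _ _ _ h3 h1 hib (Or.inr (Or.inr (Or.inr (Or.inr (Or.inl ⟨hgc, hga, hgb⟩)))))
  · exact absurd h1 hab'
  · rcases lt_trichotomy ((pvKs A).idxOf a) ((pvKs A).idxOf c) with h2 | h2 | h2
    · exact key _ _ _ h1 h2 hic (Or.inr (Or.inr (Or.inl ⟨hgb, hga, hgc⟩)))
    · exact absurd h2 hac'
    · rcases lt_trichotomy ((pvKs A).idxOf b) ((pvKs A).idxOf c) with h3 | h3 | h3
      · exact key _ _ _ h3 h2 hia (Or.inr (Or.inr (Or.inr (Or.inl ⟨hgb, hgc, hga⟩))))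
      · exact absurd h3 hbc'
      · exact key _ _ _ h3 h1 hia (Or.inr (Or.inr (Or.inr (Or.inr (Or.inr ⟨hgc, hgb, hga⟩)))))

-- counting facts for the three triple shapes
theorem pvCount3_le (fs : List (Int × Int)) (x y z e : Int × Int)
    (hx : x ∈ fs) (hy : y ∈ fs) (hz : z ∈ fs) (hxy : x ≠ y) (hyz : y ≠ z) (hxz : x ≠ z) :
    List.count e [x, y, z] ≤ List.count e fs := by
  have cx : 1 ≤ fs.count x := List.one_le_count_iff.mpr hx
  have cy : 1 ≤ fs.count y := List.one_le_count_iff.mpr hy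
  have cz : 1 ≤ fs.count z := List.one_le_count_iff.mpr hz
  by_cases hex : e = x
  · subst hex; simp [Ne.symm hxy, Ne.symm hxz]; omega
  · by_cases hey : e = y
    · subst hey; simp [hxy, Ne.symm hyz]; omega
    · by_cases hez : e = z
      · subst hez; simp [hxz, hyz]; omega
      · simp [Ne.symm hex, Ne.symm hey, Ne.symm hez]

theorem pvCountAAB_le (fs : List (Int × Int)) (a b e : Int × Int)
    (hb : b ∈ fs) (hab : a ≠ b) (hca : 2 ≤ fs.count a) :
    List.count e [a, a, b] ≤ List.count e fs := by
  have cb : 1 ≤ fs.count b := List.one_le_count_iff.mpr hb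
  by_cases hea : e = a
  · subst hea; simp [Ne.symm hab]; omega
  · by_cases heb : e = b
    · subst heb; simp [hab]; omega
    · simp [Ne.symm hea, Ne.symm heb]

theorem pvCountAAA_le (fs : List (Int × Int)) (a e : Int × Int)
    (hca : 3 ≤ fs.count a) : List.count e [a, a, a] ≤ List.count e fs := by
  by_cases hea : e = a
  · subst hea; simp; omega
  · simp [Ne.symm hea]

-- ===== VERDICT (by name: the statement is the Claim_ definition above) =====
theorem solution_spec : Claim_equal_solution := by
  intro A _
  unfold Spec_solution
  apply le_antisymm
  · -- every contribution of A is matched by a triple of elements in B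
    apply pvA_le A _ (pvB_nonneg A)
    · intro i j k hij hjk hk
      have hnd := PySem.List.nodup_dedup (A.map pvFactors)
      have hxy : (pvKs A)[i] ≠ (pvKs A)[j] := by
        intro h
        have := (List.Nodup.getElem_inj_iff hnd).mp h
        omega
      have hyz : (pvKs A)[j] ≠ (pvKs A)[k] := by
        intro h
        have := (List.Nodup.getElem_inj_iff hnd).mp h
        omega
      have hxz : (pvKs A)[i] ≠ (pvKs A)[k] := by
        intro h
        have := (List.Nodup.getElem_inj_iff hnd).mp h
        omega
      have hmem : ∀ (t : Nat) (ht : t < (pvKs A).length), (pvKs A)[t] ∈ A.map pvFactors :=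
        fun t ht => (PySem.List.mem_dedup _ _).mp (List.getElem_mem ht)
      exact pvB_contrib_count A _ _ _ (fun e => pvCount3_le _ _ _ _ e
        (hmem i (by omega)) (hmem j (by omega)) (hmem k hk) hxy hyz hxz)
    · intro a ha h3
      have := pvB_contrib_count A a a a (fun e => pvCountAAA_le _ _ e h3)
      unfold pvVal at this
      omega
    · intro a b ha hb hne h2
      have hbfs : b ∈ A.map pvFactors := (PySem.List.mem_dedup _ _).mp hb
      exact pvB_contrib_count A a a b (fun e => pvCountAAB_le _ _ _ e hbfs hne h2)
  · -- every triple of elements in B is matched by a contribution of A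
    apply pvB_le A _ (pvA_nonneg A)
    intro x y z hsub
    have hx : x ∈ A.map pvFactors := hsub.subset (by simp)
    have hy : y ∈ A.map pvFactors := hsub.subset (by simp)
    have hz : z ∈ A.map pvFactors := hsub.subset (by simp)
    have hx' : x ∈ pvKs A := (PySem.List.mem_dedup _ _).mpr hx
    have hy' : y ∈ pvKs A := (PySem.List.mem_dedup _ _).mpr hy
    have hz' : z ∈ pvKs A := (PySem.List.mem_dedup _ _).mpr hz
    by_cases hxy : x = y
    · by_cases hyz : y = z
      · -- x = y = z
        subst hxy; subst hyz
        have h3 : 3 ≤ (A.map pvFactors).count x := by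
          have h := List.Sublist.count_le x hsub
          simp at h
          omega
        have := pvA_contrib2 A x hx' h3
        unfold pvVal
        omega
      · -- x = y ≠ z
        subst hxy
        have hxz : x ≠ z := hyz
        have h2 : 2 ≤ (A.map pvFactors).count x := by
          have h := List.Sublist.count_le x hsub
          simp [Ne.symm hxz] at h
          omega
        exact pvA_contrib3 A x z hx' hz' hxz h2
    · by_cases hyz : y = z
      · -- x ≠ y = z
        subst hyz
        have h2 : 2 ≤ (A.map pvFactors).count y := by
          have h := List.Sublist.count_le y hsub
          simp [hxy] at h
          omega
        have := pvA_contrib3 A y x hy' hx' (Ne.symm hxy) h2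
        unfold pvVal at this ⊢
        omega
      · by_cases hxz : x = z
        · -- x = z ≠ y
          subst hxz
          have h2 : 2 ≤ (A.map pvFactors).count x := by
            have h := List.Sublist.count_le x hsub
            simp [Ne.symm hxy] at h
            omega
          have := pvA_contrib3 A x y hx' hy' hxy h2
          unfold pvVal at this ⊢
          omega
        · -- all distinct
          exact pvA_contrib1' A x y z hx' hy' hz' hxy hyz hxz
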